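-- pv_equiv track=rewrite | github.com/hirosuzuki/procon | atcoder/abc/abc096_c.py | solve
-- ===== SOURCE A (Python) =====
-- def solve(H, W, S):
--     s = [row + "." for row in S] + ["." * (W + 1)]
--     for y in range(H):
--         for x in range(W):
--             if s[y][x] == "#" \
--                 and s[y-1][x] == "." and s[y+1][x] == "." \
--                 and s[y][x-1] == "." and s[y][x+1] == ".":
--                 return False
--     return True
-- ===== SOURCE B (Python) =====
-- def solve(H, W, S):
--     # Run-length scan: decompose each row into maximal runs of '#'; a run of
--     # length >= 2 supports all its cells horizontally, so only singleton runs
--     # need a vertical '#' neighbour check.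
--     for y in range(H):
--         x = 0
--         while x < W:
--             if S[y][x] == "#":
--                 r = x + 1
--                 while r < W and S[y][r] == "#":
--                     r += 1
--                 if r - x == 1 and not (
--                         (y > 0 and S[y - 1][x] == "#")
--                         or (y + 1 < H and S[y + 1][x] == "#")):
--                     return False
--                 x = r
--             else:
--                 x += 1
--     return True
-- ===== Notes on version B (the rewrite author's own statement) =====
-- stated objective: alternative
-- what changed: A applies a four-neighbour stencil to every cell of a '.'-padded copy of the grid (using negative-index wraparound at the borders); B decomposes each row into maximal runs of '#' and jumps run to run: a run of length >= 2 supports all its cells horizontally, so only singleton runs trigger a vertical neighbour check.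
-- outside the precondition, e.g. on solve(1, 1, ['##']): A returns True, B returns False; on solve(1, 2, ['#.', '#.']): A returns True, B returns False; on solve(1, 2, ['#x']): A returns True, B returns False
import Mathlib
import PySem

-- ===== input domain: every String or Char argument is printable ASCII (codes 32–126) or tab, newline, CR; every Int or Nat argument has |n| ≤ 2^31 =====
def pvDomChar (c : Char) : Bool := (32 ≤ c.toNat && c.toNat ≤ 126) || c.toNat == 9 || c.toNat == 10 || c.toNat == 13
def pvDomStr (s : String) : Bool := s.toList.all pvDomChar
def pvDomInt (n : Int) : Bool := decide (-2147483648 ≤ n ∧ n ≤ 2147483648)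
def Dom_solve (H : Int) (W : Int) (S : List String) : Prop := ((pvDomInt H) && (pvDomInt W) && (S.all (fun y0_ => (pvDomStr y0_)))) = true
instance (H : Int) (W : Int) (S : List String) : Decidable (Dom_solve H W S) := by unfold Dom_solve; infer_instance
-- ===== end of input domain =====

-- B replaces A's padded-grid four-neighbour stencil over every cell with a run-length scan of
-- each row: maximal '#'-runs of length >= 2 are skipped wholesale, and only singleton runs get
-- a vertical neighbour check (alternative algorithm, same asymptotic cost).

-- ===== PORT A =====
-- s[y][x] (possibly negative index, Python wraparound) on the padded grid; the default
-- is never reached on inputs admitted by Pre_solve (Python raises exactly where it would be).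
def pyGetC (s : List (List Char)) (y x : Int) : Char :=
  ((PySem.List.pyGet? s y).bind (fun r => PySem.List.pyGet? r x)).getD ' '

def solve (H : Int) (W : Int) (S : List String) : Bool :=
  let s : List (List Char) := S.map (fun row => row.toList ++ ['.']) ++ [List.replicate (W + 1).toNat '.']
  !((PySem.List.pyRange 0 H 1).any (fun y =>
      (PySem.List.pyRange 0 W 1).any (fun x =>
        pyGetC s y x == '#' && pyGetC s (y - 1) x == '.' && pyGetC s (y + 1) x == '.' &&
          pyGetC s y (x - 1) == '.' && pyGetC s y (x + 1) == '.')))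

-- ===== PORT B =====
-- S[y] as a character list; the "" default is never reached on inputs admitted by Pre_solve
-- (Python raises IndexError exactly where it would be).
def rowAt (S : List String) (y : Int) : List Char := ((PySem.List.pyGet? S y).getD "").toList

-- row[i]; the ' ' default is never reached on inputs admitted by Pre_solve.
def bGet (row : List Char) (i : Int) : Char := (PySem.List.pyGet? row i).getD ' '

-- the inner `while r < W and row[r] == "#": r += 1` loop of Source B
def bRunEnd (row : List Char) (W : Int) (r : Int) : Int :=
  if h : r < W ∧ bGet row r = '#' then bRunEnd row W (r + 1) else r
termination_by (W - r).toNat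
decreasing_by omega

-- termination fact bColLoop cites: the run scan never moves backwards
theorem bRunEnd_ge (row : List Char) (W : Int) (r : Int) : r ≤ bRunEnd row W r := by
  rw [bRunEnd]
  split
  · have := bRunEnd_ge row W (r + 1); omega
  · omega
termination_by (W - r).toNat
decreasing_by omega

-- the `while x < W:` loop body of Source B for one row (true = an unsupported '#' was found)
def bColLoop (H : Int) (W : Int) (S : List String) (y : Int) (x : Int) : Bool :=
  if hx : x < W then
    if bGet (rowAt S y) x = '#' then
      if bRunEnd (rowAt S y) W (x + 1) - x = 1 ∧
          ¬ ((0 < y ∧ bGet (rowAt S (y - 1)) x = '#') ∨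
             (y + 1 < H ∧ bGet (rowAt S (y + 1)) x = '#')) then
        true
      else bColLoop H W S y (bRunEnd (rowAt S y) W (x + 1))
    else bColLoop H W S y (x + 1)
  else false
termination_by (W - x).toNat
decreasing_by
  · have := bRunEnd_ge (rowAt S y) W (x + 1); omega
  · omega

def solve_alt (H : Int) (W : Int) (S : List String) : Bool :=
  !((PySem.List.pyRange 0 H 1).any (fun y => bColLoop H W S y 0))

-- ===== PRECONDITION & SPEC =====
-- Pre_ admits the degenerate empty scans (H ≤ 0 or W ≤ 0, where A touches no cell) and the
-- well-formed grid instances (H = len(S), every row of length W, alphabet {'#','.'}); it excludes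
-- ill-formed instances with 0 < H, 0 < W where A either raises (rows shorter than the scan needs)
-- or returns values that are artefacts of reading row characters beyond the declared H×W window
-- and of comparing undeclared characters against '.' (see cites in claim.json).
def Pre_solve (H : Int) (W : Int) (S : List String) : Prop :=
  H ≤ 0 ∨ W ≤ 0 ∨
    (H = (S.length : Int) ∧
      ∀ row ∈ S, ((row.toList.length : Int) = W ∧ (row.toList.all (fun c => c == '#' || c == '.')) = true))
instance (H : Int) (W : Int) (S : List String) : Decidable (Pre_solve H W S) := by
  unfold Pre_solve; infer_instance

def pvWitness_solve : Int × Int × List String := (2, 2, ["##", ".."])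

def Spec_solve (H : Int) (W : Int) (S : List String) (out : Bool) : Prop := out = solve_alt H W S
instance (H : Int) (W : Int) (S : List String) (out : Bool) : Decidable (Spec_solve H W S out) := by
  unfold Spec_solve; infer_instance

-- ===== CLAIM (what is proved, stated in full; the proofs are below) =====
def Claim_equal_solve : Prop := ∀ (H : Int) (W : Int) (S : List String), Dom_solve H W S → Pre_solve H W S → Spec_solve H W S (solve H W S)

-- ===== LEMMAS AND PROOFS =====

-- "cell (y, x) of the grid S holds '#'" — the common specification both ports are reduced to.
def SharpAt (S : List String) (y x : Int) : Prop :=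
  ∃ (k j : Nat), y = (k : Int) ∧ x = (j : Int) ∧
    ∃ row, S[k]? = some row ∧ row.toList[j]? = some '#'

-- "cell (y, x) has a '#' among its four neighbours"
def Supported (S : List String) (y x : Int) : Prop :=
  SharpAt S (y - 1) x ∨ SharpAt S (y + 1) x ∨ SharpAt S y (x - 1) ∨ SharpAt S y (x + 1)

lemma pyGetNonneg {α : Type} (xs : List α) (i : Int) (h0 : 0 ≤ i) :
    PySem.List.pyGet? xs i = xs[i.toNat]? := by
  obtain ⟨n, rfl⟩ := Int.eq_ofNat_of_zero_le h0
  exact PySem.List.pyGet?_natCast xs n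

lemma pyGet?_neg_one' {α : Type} (xs : List α) (h : xs ≠ []) :
    PySem.List.pyGet? xs (-1) = xs[xs.length - 1]? := by
  have hl : 0 < xs.length := List.length_pos_iff.2 h
  simp only [PySem.List.pyGet?, PySem.List.pyIdx?]
  rw [if_neg (by omega), if_pos (by omega)]
  simp

lemma sharpAt_elim (S : List String) (y x : Int) (h : SharpAt S y x) :
    ∃ (k j : Nat), y = (k : Int) ∧ x = (j : Int) ∧ ∃ (hk : k < S.length) (hj : j < S[k].toList.length),
      S[k].toList[j] = '#' := by
  obtain ⟨k, j, rfl, rfl, row, hr, hc⟩ := h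
  have hk : k < S.length := by
    by_contra hk'
    rw [List.getElem?_eq_none (by omega)] at hr
    simp at hr
  rw [List.getElem?_eq_getElem hk] at hr
  obtain rfl : S[k] = row := Option.some_inj.1 hr
  have hj : j < S[k].toList.length := by
    by_contra hj'
    rw [List.getElem?_eq_none (by omega)] at hc
    simp at hc
  rw [List.getElem?_eq_getElem hj] at hc
  exact ⟨k, j, rfl, rfl, hk, hj, Option.some_inj.1 hc⟩

lemma sharpAt_intro (S : List String) (k j : Nat) (hk : k < S.length)
    (hj : j < S[k].toList.length) (hc : S[k].toList[j] = '#') :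
    SharpAt S (k : Int) (j : Int) :=
  ⟨k, j, rfl, rfl, S[k], List.getElem?_eq_getElem hk,
    by rw [List.getElem?_eq_getElem hj, hc]⟩

lemma sharp_bounds (S : List String) (W : Int)
    (hrow : ∀ row ∈ S, ((row.toList.length : Int) = W ∧ ∀ c ∈ row.toList, c = '#' ∨ c = '.'))
    (y x : Int) (h : SharpAt S y x) :
    0 ≤ y ∧ y < (S.length : Int) ∧ 0 ≤ x ∧ x < W := by
  obtain ⟨k, j, rfl, rfl, hk, hj, _⟩ := sharpAt_elim S _ _ h
  have hW := (hrow S[k] (List.getElem_mem hk)).1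
  refine ⟨by positivity, by exact_mod_cast hk, by positivity, by omega⟩

lemma pyGet?_pad_left (rl : List Char) (x : Int) (h0 : 0 ≤ x) (h1 : x < (rl.length : Int)) :
    PySem.List.pyGet? (rl ++ ['.']) x = rl[x.toNat]? := by
  rw [pyGetNonneg _ _ h0, List.getElem?_append_left (by omega)]

lemma pyGet?_pad_dot (rl : List Char) (x : Int) (h : x = -1 ∨ x = (rl.length : Int)) :
    PySem.List.pyGet? (rl ++ ['.']) x = some '.' := by
  have hidx : PySem.List.pyGet? (rl ++ ['.']) x = (rl ++ ['.'])[rl.length]? := by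
    rcases h with rfl | rfl
    · rw [pyGet?_neg_one' _ (by simp)]
      simp
    · rw [pyGetNonneg _ _ (by positivity)]
      simp
  rw [hidx, List.getElem?_append_right (by omega)]
  simp

lemma pyGet?_replicate_dot (W x : Int) (hW0 : 0 ≤ W) (hx1 : -1 ≤ x) (hx2 : x ≤ W) :
    PySem.List.pyGet? (List.replicate (W + 1).toNat ('.' : Char)) x = some '.' := by
  by_cases h : 0 ≤ x
  · rw [pyGetNonneg _ _ h, List.getElem?_replicate, if_pos (by omega)]
  · have hx : x = -1 := by omega
    subst hx
    rw [pyGet?_neg_one' _ (by simp; omega)]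
    simp only [List.length_replicate, List.getElem?_replicate]
    rw [if_pos (by omega)]

-- every admissible read of A's padded grid yields '#' or '.', and yields '#' exactly on SharpAt cells
lemma pyGetC_padded (W : Int) (S : List String)
    (hrow : ∀ row ∈ S, ((row.toList.length : Int) = W ∧ ∀ c ∈ row.toList, c = '#' ∨ c = '.'))
    (hS : S ≠ []) (y x : Int) (hy1 : -1 ≤ y) (hy2 : y ≤ (S.length : Int))
    (hx1 : -1 ≤ x) (hx2 : x ≤ W) :
    (pyGetC (S.map (fun row => row.toList ++ ['.']) ++ [List.replicate (W + 1).toNat '.']) y x = '#'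
       ↔ SharpAt S y x) ∧
    (pyGetC (S.map (fun row => row.toList ++ ['.']) ++ [List.replicate (W + 1).toNat '.']) y x = '#'
       ∨ pyGetC (S.map (fun row => row.toList ++ ['.']) ++ [List.replicate (W + 1).toNat '.']) y x = '.') := by
  obtain ⟨r0, hr0⟩ := List.exists_mem_of_ne_nil S hS
  have hW0 : 0 ≤ W := by have := (hrow r0 hr0).1; omega
  set s := S.map (fun row => row.toList ++ ['.']) ++ [List.replicate (W + 1).toNat '.'] with hs
  have hslen : s.length = S.length + 1 := by simp [hs]
  have hpadrow : ¬ (0 ≤ y ∧ y < (S.length : Int)) →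
      PySem.List.pyGet? s y = some (List.replicate (W + 1).toNat '.') := by
    intro hout
    have hy : y = -1 ∨ y = (S.length : Int) := by omega
    have : PySem.List.pyGet? s y = s[S.length]? := by
      rcases hy with rfl | rfl
      · rw [pyGet?_neg_one' _ (by simp [hs])]
        congr 1
        omega
      · rw [pyGetNonneg _ _ (by positivity)]
        simp
    rw [this, hs, List.getElem?_append_right (by simp)]
    simp
  by_cases hin : 0 ≤ y ∧ y < (S.length : Int)
  · -- a real row of the grid
    have hkn : y.toNat < S.length := by omega
    have houter : PySem.List.pyGet? s y = some (S[y.toNat].toList ++ ['.']) := by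
      rw [pyGetNonneg _ _ hin.1, hs, List.getElem?_append_left (by simpa using hkn),
        List.getElem?_map, List.getElem?_eq_getElem hkn]
      rfl
    have hlen : (S[y.toNat].toList.length : Int) = W := (hrow _ (List.getElem_mem hkn)).1
    by_cases hxin : 0 ≤ x ∧ x < W
    · have hjn : x.toNat < S[y.toNat].toList.length := by omega
      have hinner : PySem.List.pyGet? (S[y.toNat].toList ++ ['.']) x = some S[y.toNat].toList[x.toNat] := by
        rw [pyGet?_pad_left _ _ hxin.1 (by omega), List.getElem?_eq_getElem hjn]
      have hval : pyGetC s y x = S[y.toNat].toList[x.toNat] := by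
        simp [pyGetC, houter, hinner]
      constructor
      · rw [hval]
        constructor
        · intro hc
          have := sharpAt_intro S y.toNat x.toNat hkn hjn hc
          simpa [Int.toNat_of_nonneg hin.1, Int.toNat_of_nonneg hxin.1] using this
        · intro hsharp
          obtain ⟨k, j, hk1, hk2, hk, hj, hc⟩ := sharpAt_elim S y x hsharp
          have : k = y.toNat ∧ j = x.toNat := by omega
          obtain ⟨rfl, rfl⟩ := this
          exact hc
      · rw [hval]
        exact (hrow _ (List.getElem_mem hkn)).2 _ (List.getElem_mem hjn)
    · have hnsharp : ¬ SharpAt S y x := fun h => by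
        have := sharp_bounds S W hrow y x h
        omega
      have hdot : pyGetC s y x = '.' := by
        have hinner : PySem.List.pyGet? (S[y.toNat].toList ++ ['.']) x = some '.' := by
          apply pyGet?_pad_dot
          omega
        simp [pyGetC, houter, hinner]
      rw [hdot]
      exact ⟨by simp [hnsharp], Or.inr rfl⟩
  · have hnsharp : ¬ SharpAt S y x := fun h => by
      have := sharp_bounds S W hrow y x h
      omega
    have hdot : pyGetC s y x = '.' := by
      rw [pyGetC, hpadrow hin]
      rw [Option.bind_some (f := fun r => PySem.List.pyGet? r x)]
      rw [pyGet?_replicate_dot W x hW0 hx1 hx2]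
      rfl
    rw [hdot]
    exact ⟨by simp [hnsharp], Or.inr rfl⟩

lemma a_core (W : Int) (S : List String)
    (hrow : ∀ row ∈ S, ((row.toList.length : Int) = W ∧ ∀ c ∈ row.toList, c = '#' ∨ c = '.')) :
    solve (S.length : Int) W S = true ↔ ∀ y x : Int, SharpAt S y x → Supported S y x := by
  unfold solve
  rw [Bool.not_eq_true', List.any_eq_false]
  constructor
  · intro h y x hs
    have hb := sharp_bounds S W hrow y x hs
    have hSne : S ≠ [] := by
      intro e; subst e; simp at hb; omega
    have hy := h y (by rw [PySem.List.mem_pyRange_one]; exact ⟨hb.1, hb.2.1⟩)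
    by_contra hns
    unfold Supported at hns
    simp only [not_or] at hns
    obtain ⟨h1, h2, h3, h4⟩ := hns
    have P := pyGetC_padded W S hrow hSne
    have c0 := (P y x (by omega) (by omega) (by omega) (by omega)).1.mpr hs
    have d1 := P (y - 1) x (by omega) (by omega) (by omega) (by omega)
    have d2 := P (y + 1) x (by omega) (by omega) (by omega) (by omega)
    have d3 := P y (x - 1) (by omega) (by omega) (by omega) (by omega)
    have d4 := P y (x + 1) (by omega) (by omega) (by omega) (by omega)
    have e1 := d1.2.resolve_left (fun hc => h1 (d1.1.mp hc))
    have e2 := d2.2.resolve_left (fun hc => h2 (d2.1.mp hc))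
    have e3 := d3.2.resolve_left (fun hc => h3 (d3.1.mp hc))
    have e4 := d4.2.resolve_left (fun hc => h4 (d4.1.mp hc))
    apply hy
    rw [List.any_eq_true]
    refine ⟨x, by rw [PySem.List.mem_pyRange_one]; exact ⟨hb.2.2.1, hb.2.2.2⟩, ?_⟩
    simp only [Bool.and_eq_true, beq_iff_eq]
    exact ⟨⟨⟨⟨c0, e1⟩, e2⟩, e3⟩, e4⟩
  · intro h y hy
    rw [PySem.List.mem_pyRange_one] at hy
    have hSne : S ≠ [] := by
      intro e; subst e; simp at hy; omega
    intro hany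
    rw [List.any_eq_true] at hany
    obtain ⟨x, hx, hcond⟩ := hany
    rw [PySem.List.mem_pyRange_one] at hx
    simp only [Bool.and_eq_true, beq_iff_eq] at hcond
    obtain ⟨⟨⟨⟨c0, e1⟩, e2⟩, e3⟩, e4⟩ := hcond
    have P := pyGetC_padded W S hrow hSne
    have hs := (P y x (by omega) (by omega) (by omega) (by omega)).1.mp c0
    have hsup := h y x hs
    unfold Supported at hsup
    rcases hsup with hn | hn | hn | hn
    · have hc := (P (y - 1) x (by omega) (by omega) (by omega) (by omega)).1.mpr hn
      rw [hc] at e1; exact absurd e1 (by decide)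
    · have hc := (P (y + 1) x (by omega) (by omega) (by omega) (by omega)).1.mpr hn
      rw [hc] at e2; exact absurd e2 (by decide)
    · have hc := (P y (x - 1) (by omega) (by omega) (by omega) (by omega)).1.mpr hn
      rw [hc] at e3; exact absurd e3 (by decide)
    · have hc := (P y (x + 1) (by omega) (by omega) (by omega) (by omega)).1.mpr hn
      rw [hc] at e4; exact absurd e4 (by decide)

-- ===== B-side lemmas =====

-- "cell (y, x) has a supporting '#' neighbour", phrased over B's raw character reads
def CSupp (H : Int) (W : Int) (S : List String) (y x : Int) : Prop :=
  (0 < x ∧ bGet (rowAt S y) (x - 1) = '#') ∨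
  (x + 1 < W ∧ bGet (rowAt S y) (x + 1) = '#') ∨
  (0 < y ∧ bGet (rowAt S (y - 1)) x = '#') ∨
  (y + 1 < H ∧ bGet (rowAt S (y + 1)) x = '#')

lemma bRunEnd_spec (row : List Char) (W : Int) (r : Int) (h0 : r ≤ W) :
    r ≤ bRunEnd row W r ∧ bRunEnd row W r ≤ W ∧
      (∀ i, r ≤ i → i < bRunEnd row W r → bGet row i = '#') ∧
      ¬ (bRunEnd row W r < W ∧ bGet row (bRunEnd row W r) = '#') := by
  rw [bRunEnd]
  split
  · next h =>
    have ih := bRunEnd_spec row W (r + 1) (by omega)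
    refine ⟨by omega, ih.2.1, ?_, ih.2.2.2⟩
    intro i hi1 hi2
    by_cases hir : i = r
    · subst hir; exact h.2
    · exact ih.2.2.1 i (by omega) hi2
  · next h =>
    exact ⟨le_refl _, h0, by omega, h⟩
termination_by (W - r).toNat
decreasing_by omega

lemma colLoop_false_iff (H W : Int) (S : List String) (y x : Int) (hx0 : 0 ≤ x)
    (hstart : x < W → bGet (rowAt S y) x = '#' → (x = 0 ∨ bGet (rowAt S y) (x - 1) ≠ '#')) :
    bColLoop H W S y x = false ↔
      ∀ x', x ≤ x' → x' < W → bGet (rowAt S y) x' = '#' → CSupp H W S y x' := by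
  rw [bColLoop]
  split
  · next hx =>
    split
    · next hsharp =>
      have hspec := bRunEnd_spec (rowAt S y) W (x + 1) (by omega)
      set r := bRunEnd (rowAt S y) W (x + 1) with hr
      split
      · next hbad =>
        -- an isolated '#': B returns true; the RHS fails at x' = x
        simp only [Bool.true_eq_false, false_iff, not_forall]
        refine ⟨x, le_refl x, hx, hsharp, ?_⟩
        unfold CSupp
        push Not
        obtain ⟨hlen, hvert⟩ := hbad
        push Not at hvert
        refine ⟨?_, ?_, hvert.1, hvert.2⟩
        · intro hxpos
          rcases hstart hx hsharp with h0 | hne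
          · omega
          · exact hne
        · intro hxw hc
          exact hspec.2.2.2 ⟨by omega, by rw [show r = x + 1 by omega]; exact hc⟩
      · next hgood =>
        -- skip the whole run [x, r)
        have hrunsharp : ∀ i, x ≤ i → i < r → bGet (rowAt S y) i = '#' := by
          intro i hi1 hi2
          by_cases hix : i = x
          · subst hix; exact hsharp
          · exact hspec.2.2.1 i (by omega) hi2
        have hsupp_run : ∀ i, x ≤ i → i < r → CSupp H W S y i := by
          intro i hi1 hi2
          by_cases hlong : x + 2 ≤ r
          · by_cases hix : i = x
            · subst hix
              exact Or.inr (Or.inl ⟨by omega, hrunsharp (i + 1) (by omega) (by omega)⟩)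
            · exact Or.inl ⟨by omega, hrunsharp (i - 1) (by omega) (by omega)⟩
          · -- r = x + 1: the guard condition must have held
            have hi : i = x := by omega
            subst hi
            have : ¬ (r - i = 1 ∧ ¬ ((0 < y ∧ bGet (rowAt S (y - 1)) i = '#') ∨
                (y + 1 < H ∧ bGet (rowAt S (y + 1)) i = '#'))) := hgood
            have hvert : (0 < y ∧ bGet (rowAt S (y - 1)) i = '#') ∨
                (y + 1 < H ∧ bGet (rowAt S (y + 1)) i = '#') := by
              by_contra hv
              exact this ⟨by omega, hv⟩
            rcases hvert with hv | hv
            · exact Or.inr (Or.inr (Or.inl hv))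
            · exact Or.inr (Or.inr (Or.inr hv))
        have ih := colLoop_false_iff H W S y r (by omega)
          (fun hrW hrc => absurd ⟨hrW, hrc⟩ hspec.2.2.2)
        rw [ih]
        constructor
        · intro h x' h1 h2 hc
          by_cases hin : x' < r
          · exact hsupp_run x' h1 hin
          · exact h x' (by omega) h2 hc
        · intro h x' h1 h2 hc
          exact h x' (by omega) h2 hc
    · next hnsharp =>
      have ih := colLoop_false_iff H W S y (x + 1) (by omega)
        (fun _ _ => Or.inr (by simpa using hnsharp))
      rw [ih]
      constructor
      · intro h x' h1 h2 hc
        by_cases hix : x' = x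
        · subst hix; exact absurd hc hnsharp
        · exact h x' (by omega) h2 hc
      · intro h x' h1 h2 hc
        exact h x' (by omega) h2 hc
  · next hx =>
    simp only [true_iff]
    intro x' h1 h2
    omega
termination_by (W - x).toNat
decreasing_by
  · have := bRunEnd_ge (rowAt S y) W (x + 1); omega
  · omega

lemma sharp_char (S : List String) (y x : Int) (hy0 : 0 ≤ y) (hy1 : y < (S.length : Int))
    (hx0 : 0 ≤ x) : bGet (rowAt S y) x = '#' ↔ SharpAt S y x := by
  have hkn : y.toNat < S.length := by omega
  have hrowAt : rowAt S y = S[y.toNat].toList := by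
    unfold rowAt
    rw [pyGetNonneg _ _ hy0, List.getElem?_eq_getElem hkn]
    rfl
  rw [hrowAt]
  unfold bGet
  rw [pyGetNonneg _ _ hx0]
  by_cases hj : x.toNat < S[y.toNat].toList.length
  · rw [List.getElem?_eq_getElem hj]
    simp only [Option.getD_some]
    constructor
    · intro hc
      have := sharpAt_intro S y.toNat x.toNat hkn hj hc
      simpa [Int.toNat_of_nonneg hy0, Int.toNat_of_nonneg hx0] using this
    · intro hs
      obtain ⟨k, j, hk1, hk2, hk, hj', hc⟩ := sharpAt_elim S y x hs
      have : k = y.toNat ∧ j = x.toNat := by omega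
      obtain ⟨rfl, rfl⟩ := this
      exact hc
  · rw [List.getElem?_eq_none (by omega)]
    simp only [Option.getD_none]
    constructor
    · intro hc; exact absurd hc (by decide)
    · intro hs
      obtain ⟨k, j, hk1, hk2, hk, hj', hc⟩ := sharpAt_elim S y x hs
      have : k = y.toNat ∧ j = x.toNat := by omega
      obtain ⟨rfl, rfl⟩ := this
      omega

lemma csupp_iff (W : Int) (S : List String)
    (hrow : ∀ row ∈ S, ((row.toList.length : Int) = W ∧ ∀ c ∈ row.toList, c = '#' ∨ c = '.'))
    (y x : Int) (hy : 0 ≤ y ∧ y < (S.length : Int)) (hx : 0 ≤ x ∧ x < W) :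
    CSupp (S.length : Int) W S y x ↔ Supported S y x := by
  unfold CSupp Supported
  constructor
  · rintro (⟨hg, hc⟩ | ⟨hg, hc⟩ | ⟨hg, hc⟩ | ⟨hg, hc⟩)
    · exact Or.inr (Or.inr (Or.inl ((sharp_char S y (x - 1) hy.1 hy.2 (by omega)).mp hc)))
    · exact Or.inr (Or.inr (Or.inr ((sharp_char S y (x + 1) hy.1 hy.2 (by omega)).mp hc)))
    · exact Or.inl ((sharp_char S (y - 1) x (by omega) (by omega) hx.1).mp hc)
    · exact Or.inr (Or.inl ((sharp_char S (y + 1) x (by omega) (by omega) hx.1).mp hc))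
  · rintro (hs | hs | hs | hs)
    · have hb := sharp_bounds S W hrow _ _ hs
      exact Or.inr (Or.inr (Or.inl ⟨by omega, (sharp_char S (y - 1) x (by omega) (by omega) hx.1).mpr hs⟩))
    · have hb := sharp_bounds S W hrow _ _ hs
      exact Or.inr (Or.inr (Or.inr ⟨by omega, (sharp_char S (y + 1) x (by omega) (by omega) hx.1).mpr hs⟩))
    · have hb := sharp_bounds S W hrow _ _ hs
      exact Or.inl ⟨by omega, (sharp_char S y (x - 1) hy.1 hy.2 (by omega)).mpr hs⟩
    · have hb := sharp_bounds S W hrow _ _ hs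
      exact Or.inr (Or.inl ⟨by omega, (sharp_char S y (x + 1) hy.1 hy.2 (by omega)).mpr hs⟩)

lemma b_core (W : Int) (S : List String)
    (hrow : ∀ row ∈ S, ((row.toList.length : Int) = W ∧ ∀ c ∈ row.toList, c = '#' ∨ c = '.')) :
    solve_alt (S.length : Int) W S = true ↔ ∀ y x : Int, SharpAt S y x → Supported S y x := by
  unfold solve_alt
  rw [Bool.not_eq_true', List.any_eq_false]
  constructor
  · intro h y x hs
    have hb := sharp_bounds S W hrow y x hs
    have hy := h y (by rw [PySem.List.mem_pyRange_one]; exact ⟨hb.1, hb.2.1⟩)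
    rw [Bool.not_eq_true] at hy
    rw [colLoop_false_iff _ _ _ _ _ (by omega) (fun _ _ => Or.inl rfl)] at hy
    have hcs := hy x hb.2.2.1 hb.2.2.2 ((sharp_char S y x hb.1 hb.2.1 hb.2.2.1).mpr hs)
    exact (csupp_iff W S hrow y x ⟨hb.1, hb.2.1⟩ ⟨hb.2.2.1, hb.2.2.2⟩).mp hcs
  · intro h y hy
    rw [PySem.List.mem_pyRange_one] at hy
    rw [Bool.not_eq_true]
    rw [colLoop_false_iff _ _ _ _ _ (by omega) (fun _ _ => Or.inl rfl)]
    intro x' h1 h2 hc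
    have hs := (sharp_char S y x' hy.1 hy.2 h1).mp hc
    exact (csupp_iff W S hrow y x' ⟨hy.1, hy.2⟩ ⟨h1, h2⟩).mpr (h y x' hs)

lemma solve_trivial (H W : Int) (S : List String) (h : H ≤ 0 ∨ W ≤ 0) :
    solve H W S = true := by
  unfold solve
  rcases h with h | h
  · rw [PySem.List.pyRange_one_eq_nil (by omega)]
    simp
  · simp only [PySem.List.pyRange_one_eq_nil (show W ≤ 0 by omega), List.any_nil]
    simp

lemma alt_trivial (H W : Int) (S : List String) (h : H ≤ 0 ∨ W ≤ 0) :
    solve_alt H W S = true := by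
  unfold solve_alt
  rcases h with h | h
  · rw [PySem.List.pyRange_one_eq_nil (by omega)]
    simp
  · rw [Bool.not_eq_true', List.any_eq_false]
    intro y _
    rw [bColLoop, dif_neg (by omega)]
    simp

-- ===== VERDICT (by name: the statement is the Claim_ definition above) =====
theorem solve_spec : Claim_equal_solve := by
  intro H W S _ pre
  unfold Spec_solve
  by_cases hH : H ≤ 0
  · rw [solve_trivial H W S (Or.inl hH), alt_trivial H W S (Or.inl hH)]
  · by_cases hW : W ≤ 0
    · rw [solve_trivial H W S (Or.inr hW), alt_trivial H W S (Or.inr hW)]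
    · rcases pre with h | h | ⟨hHlen, hrowB⟩
      · omega
      · omega
      · have hrow : ∀ row ∈ S, ((row.toList.length : Int) = W ∧ ∀ c ∈ row.toList, c = '#' ∨ c = '.') := by
          intro row hr
          refine ⟨(hrowB row hr).1, fun c hc => ?_⟩
          have hall := (hrowB row hr).2
          rw [List.all_eq_true] at hall
          simpa using hall c hc
        subst hHlen
        rw [Bool.eq_iff_iff, a_core W S hrow, b_core W S hrow]
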